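-- pv_equiv track=rewrite | github.com/aristofor/catnip | catnip/loader.py | _parse_relative_spec
-- ===== SOURCE A (Python) =====
-- def _parse_relative_spec(spec):
--     """Parse leading dots into (level, name). Returns (0, spec) if not relative."""
--     level = 0
--     for ch in spec:
--         if ch == '.':
--             level += 1
--         else:
--             break
--     if level == 0:
--         return 0, spec
--     return level, spec[level:]
-- ===== SOURCE B (Python) =====
-- def _parse_relative_spec(spec):
--     """Parse leading dots into (level, name). Returns (0, spec) if not relative."""
--     if spec.startswith('.'):
--         level, name = _parse_relative_spec(spec[1:])
--         return level + 1, name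
--     return 0, spec
-- ===== Notes on version B (the rewrite author's own statement) =====
-- stated objective: alternative
-- what changed: Replaces the iterative dot-counting loop and the level==0 special case with a recursive decomposition that peels one leading dot per call and adds 1 to the recursive level, returning the suffix directly from the base case.
import Mathlib
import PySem

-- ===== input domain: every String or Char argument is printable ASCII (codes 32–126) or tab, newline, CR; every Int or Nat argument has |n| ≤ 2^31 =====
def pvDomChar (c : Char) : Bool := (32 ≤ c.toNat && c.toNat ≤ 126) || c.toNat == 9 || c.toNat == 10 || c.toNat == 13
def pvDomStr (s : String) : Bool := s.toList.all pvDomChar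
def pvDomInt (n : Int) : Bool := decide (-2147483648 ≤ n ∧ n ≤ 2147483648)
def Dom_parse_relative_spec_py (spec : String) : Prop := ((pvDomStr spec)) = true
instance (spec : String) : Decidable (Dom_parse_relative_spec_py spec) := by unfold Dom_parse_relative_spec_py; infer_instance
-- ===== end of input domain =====

-- B replaces A's iterative dot-counting loop and its level==0 branch by a recursion that
-- peels one leading dot per call (alternative decomposition; same result, similar cost).


-- ===== PORT A =====
-- the 'for ch in spec: if ch == '.': level += 1 else: break' loop, as structural recursion
def pvCountDotsA : List Char → Nat
  | [] => 0
  | c :: t => if c = '.' then pvCountDotsA t + 1 else 0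

def parse_relative_spec_py (spec : String) : Int × String :=
  let level := pvCountDotsA spec.toList
  if level = 0 then (0, spec)
  else ((level : Int), PySem.Str.slice spec (some (level : Int)) none)

-- ===== PORT B =====
-- B recurses: if spec starts with '.', recurse on spec[1:] and add 1 to the level;
-- otherwise return (0, spec). Ported on the code points ('startswith('.')' = head is '.',
-- 'spec[1:]' = tail); the base case returns the remaining characters unchanged.
def pvParseRecB : List Char → Int × List Char
  | [] => (0, [])
  | c :: t =>
      if c = '.' then
        let r := pvParseRecB t
        (r.1 + 1, r.2)
      else (0, c :: t)

def parse_relative_spec_py_alt (spec : String) : Int × String :=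
  let r := pvParseRecB spec.toList
  (r.1, String.ofList r.2)

-- ===== PRECONDITION & SPEC =====
def Spec_parse_relative_spec_py (spec : String) (out : Int × String) : Prop := out = parse_relative_spec_py_alt spec
instance (spec : String) (out : Int × String) : Decidable (Spec_parse_relative_spec_py spec out) := by unfold Spec_parse_relative_spec_py; infer_instance

-- ===== CLAIM (what is proved, stated in full; the proofs are below) =====
def Claim_equal_parse_relative_spec_py : Prop := ∀ (spec : String), Dom_parse_relative_spec_py spec → Spec_parse_relative_spec_py spec (parse_relative_spec_py spec)

-- ===== LEMMAS AND PROOFS =====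
-- B's recursion computes A's dot count and the suffix after the dots.
theorem pvParseRecB_eq (cs : List Char) :
    pvParseRecB cs = ((pvCountDotsA cs : Int), cs.drop (pvCountDotsA cs)) := by
  induction cs with
  | nil => rfl
  | cons c t ih =>
    by_cases h : c = '.'
    · simp [pvParseRecB, pvCountDotsA, h, ih]
    · simp [pvParseRecB, pvCountDotsA, h]

-- ===== VERDICT (by name: the statement is the Claim_ definition above) =====
theorem parse_relative_spec_py_spec : Claim_equal_parse_relative_spec_py := by
  intro spec _
  unfold Spec_parse_relative_spec_py parse_relative_spec_py parse_relative_spec_py_alt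
  rw [pvParseRecB_eq]
  by_cases h : pvCountDotsA spec.toList = 0
  · simp [h]
  · rw [if_neg h]
    refine Prod.ext rfl ?_
    show PySem.Str.slice spec (some ((pvCountDotsA spec.toList : Nat) : Int)) none
        = String.ofList (spec.toList.drop (pvCountDotsA spec.toList))
    simp [PySem.Str.slice, PySem.List.slice_from_natCast]
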